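-- pv_equiv track=rewrite | github.com/StrayLemming/advent_of_code | 2023/23_day_1.py | sum_calibration_strings
-- ===== SOURCE A (Python) =====
-- def sum_calibration_strings(content):
--
--     # Test case
--     # elf_list = "bxfour3two2sb4twondmfdpsz"
--
--     num_str_list = [('one', 1), ('two', 2), ('three', 3), ('four', 4),
--                     ('five', 5), ('six', 6), ('seven', 7), ('eight', 8), ('nine', 9)]
--
--     num_list = [1, 2, 3, 4, 5, 6, 7, 8, 9]
--
--     num_sum = []
--
--     for line in content:
--
--         num_extract = []
--
--         # Find will return the first instance it finds, therefore the While loop and incrementing the index will catch multiple instances of a number e.g.twotwo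
--         for num_str, value in num_str_list:
--             index = 0
--             while index != -1:
--                 index = line.find(num_str, index)
--                 if index != -1:
--                     result = (value, index)
--                     num_extract.append(result)
--                     index += 1  # Move to the next position for the next search
--
--         for num in num_list:
--             index = 0
--             while index != -1:
--                 index = line.find(str(num), index)
--                 if index != -1:
--                     result = (num, index)
--                     num_extract.append(result)
--                     index += 1  # Move to the next position for the next search
--
--         lowest_tuple = min(num_extract, key=lambda x: x[1])
--         highest_tuple = max(num_extract, key=lambda x: x[1])
--         num_concat = int(str(lowest_tuple[0]) + str(highest_tuple[0]))
--         num_sum.append(num_concat)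
--
--     total_sum = sum(num_sum)
--     return total_sum
-- ===== SOURCE B (Python) =====
-- def sum_calibration_strings(content):
--     # One left-to-right scan per line over its suffixes, keeping first/last match;
--     # value built arithmetically instead of collecting all (value, index) pairs.
--     words = [('one', 1), ('two', 2), ('three', 3), ('four', 4),
--              ('five', 5), ('six', 6), ('seven', 7), ('eight', 8), ('nine', 9)]
--     total = 0
--     for line in content:
--         first = None
--         last = None
--         s = line
--         while s:
--             c = s[0]
--             if '1' <= c <= '9':
--                 v = ord(c) - 48
--             else:
--                 v = next((val for w, val in words if s.startswith(w)), None)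
--             if v is not None:
--                 if first is None:
--                     first = v
--                 last = v
--             s = s[1:]
--         total += 10 * first + last
--     return total
-- ===== Notes on version B (the rewrite author's own statement) =====
-- stated objective: simpler
-- what changed: A runs 18 separate find-restart loops per line collecting every (value, index) pair and then takes min/max by index and concatenates digit strings; B makes one left-to-right pass over each line's suffixes, keeping just the first and last matched value and computing 10*first+last arithmetically.
import Mathlib
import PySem

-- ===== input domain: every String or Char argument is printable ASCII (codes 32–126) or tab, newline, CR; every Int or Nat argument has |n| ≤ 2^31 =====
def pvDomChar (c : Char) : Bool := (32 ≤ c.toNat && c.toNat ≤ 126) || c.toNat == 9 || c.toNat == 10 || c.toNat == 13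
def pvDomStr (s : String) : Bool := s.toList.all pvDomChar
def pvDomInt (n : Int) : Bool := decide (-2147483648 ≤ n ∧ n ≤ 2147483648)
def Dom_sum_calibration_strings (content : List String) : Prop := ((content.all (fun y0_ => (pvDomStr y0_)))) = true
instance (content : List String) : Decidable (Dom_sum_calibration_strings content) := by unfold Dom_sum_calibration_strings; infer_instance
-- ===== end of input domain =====

-- B replaces A's 18 find-loops plus min/max over (value, index) pairs by a single
-- left-to-right scan over each line's suffixes keeping the first and last match
-- (objective: simpler / one pass). A raises ValueError on a line with no digit
-- word or digit 1-9; those inputs are excluded by Pre_.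


-- ===== PORT A =====
def pvNumStrList : List (List Char × Int) :=
  [(['o','n','e'], 1), (['t','w','o'], 2), (['t','h','r','e','e'], 3), (['f','o','u','r'], 4),
   (['f','i','v','e'], 5), (['s','i','x'], 6), (['s','e','v','e','n'], 7), (['e','i','g','h','t'], 8),
   (['n','i','n','e'], 9)]

def pvNumList : List Int := [1, 2, 3, 4, 5, 6, 7, 8, 9]

-- A's inner 'while index != -1' loop for one search token: collects (value, index)
-- for every occurrence, restarting the find at index+1.  The fuel only makes the
-- loop total; line.length+1 iterations always suffice (each find moves forward).
def pvCollect (line sub : List Char) (v : Int) : Nat → Nat → List (Int × Int) → List (Int × Int)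
  | 0, _, acc => acc
  | fuel + 1, start, acc =>
    let idx := PySem.Chars.findFrom line sub (start : Int) none
    if idx = -1 then acc
    else pvCollect line sub v fuel (idx.toNat + 1) (acc ++ [(v, idx)])

-- num_extract for one line: the word loop then the digit loop, in A's order.
def pvExtract (cs : List Char) : List (Int × Int) :=
  pvNumList.foldl (fun acc n => pvCollect cs (PySem.Int.toChars n) n (cs.length + 1) 0 acc)
    (pvNumStrList.foldl (fun acc tv => pvCollect cs tv.1 tv.2 (cs.length + 1) 0 acc) [])

-- one line of A: min/max by index, then int(str(lo) + str(hi)).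
-- On an empty num_extract Python raises ValueError (excluded by Pre_); 0 there.
def pvLineA (cs : List Char) : Int :=
  match PySem.List.min? (pvExtract cs) (fun x => x.2), PySem.List.max? (pvExtract cs) (fun x => x.2) with
  | some lo, some hi => (PySem.Int.ofChars? (PySem.Int.toChars lo.1 ++ PySem.Int.toChars hi.1)).getD 0
  | _, _ => 0

def sum_calibration_strings (content : List String) : Int :=
  (content.map (fun line => pvLineA line.toList)).sum

-- ===== PORT B =====
def pvWordsB : List (List Char × Int) :=
  [(['o','n','e'], 1), (['t','w','o'], 2), (['t','h','r','e','e'], 3), (['f','o','u','r'], 4),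
   (['f','i','v','e'], 5), (['s','i','x'], 6), (['s','e','v','e','n'], 7), (['e','i','g','h','t'], 8),
   (['n','i','n','e'], 9)]

-- the loop body's value v at the current suffix s: a digit 1-9 at s[0], else the
-- first word the suffix starts with (next(... ) in Source B).
def pvMatchHead (s : List Char) : Option Int :=
  match s with
  | [] => none
  | c :: _ =>
    if '1' ≤ c ∧ c ≤ '9' then some ((c.toNat : Int) - 48)
    else (pvWordsB.find? (fun wv => PySem.Chars.startswith s wv.1)).map (fun wv => wv.2)

-- Source B's 'while s: ... s = s[1:]' loop carrying (first, last).
def pvScan : List Char → Option Int × Option Int → Option Int × Option Int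
  | [], st => st
  | c :: rest, st =>
    match pvMatchHead (c :: rest) with
    | none => pvScan rest st
    | some v => pvScan rest (some (st.1.getD v), some v)

-- one line of B: 10*first + last.  Python raises TypeError when no match
-- (first is None; excluded by Pre_); 0 there.
def pvLineB (cs : List Char) : Int :=
  match pvScan cs (none, none) with
  | (some f, some l) => 10 * f + l
  | _ => 0

def sum_calibration_strings_alt (content : List String) : Int :=
  content.foldl (fun acc line => acc + pvLineB line.toList) 0

-- ===== PRECONDITION & SPEC =====
-- the 18 search tokens (nine words, nine digit strings)
def pvAllSubs : List (List Char) :=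
  [['o','n','e'], ['t','w','o'], ['t','h','r','e','e'], ['f','o','u','r'], ['f','i','v','e'],
   ['s','i','x'], ['s','e','v','e','n'], ['e','i','g','h','t'], ['n','i','n','e'],
   ['1'], ['2'], ['3'], ['4'], ['5'], ['6'], ['7'], ['8'], ['9']]

-- Pre_ excludes lines containing no digit 1-9 and no digit word: there A's
-- min() of an empty list raises ValueError (and B's 10*None raises TypeError).
def Pre_sum_calibration_strings (content : List String) : Prop :=
  ∀ s ∈ content, ∃ t ∈ pvAllSubs, PySem.Chars.isIn t s.toList = true
instance (content : List String) : Decidable (Pre_sum_calibration_strings content) := by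
  unfold Pre_sum_calibration_strings; infer_instance

def pvWitness_sum_calibration_strings : List String := (["one1", "x7z"])

def Spec_sum_calibration_strings (content : List String) (out : Int) : Prop :=
  out = sum_calibration_strings_alt content
instance (content : List String) (out : Int) : Decidable (Spec_sum_calibration_strings content out) := by
  unfold Spec_sum_calibration_strings; infer_instance

-- ===== CLAIM (what is proved, stated in full; the proofs are below) =====
def Claim_equal_sum_calibration_strings : Prop :=
  ∀ (content : List String), Dom_sum_calibration_strings content →
    Pre_sum_calibration_strings content →
    Spec_sum_calibration_strings content (sum_calibration_strings content)

-- ===== LEMMAS AND PROOFS =====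

-- all 18 tokens as (chars, value) pairs, a flat literal
def pvToks : List (List Char × Int) :=
  [(['o','n','e'], 1), (['t','w','o'], 2), (['t','h','r','e','e'], 3), (['f','o','u','r'], 4),
   (['f','i','v','e'], 5), (['s','i','x'], 6), (['s','e','v','e','n'], 7), (['e','i','g','h','t'], 8),
   (['n','i','n','e'], 9),
   (['1'], 1), (['2'], 2), (['3'], 3), (['4'], 4), (['5'], 5), (['6'], 6), (['7'], 7), (['8'], 8), (['9'], 9)]

lemma pvToks_eq : pvNumStrList ++ pvNumList.map (fun n => (PySem.Int.toChars n, n)) = pvToks := by decide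

lemma pvToks_ne_nil : ∀ tv ∈ pvToks, tv.1 ≠ ([] : List Char) := by decide

lemma pvToks_prefix_free : ∀ tv ∈ pvToks, ∀ tw ∈ pvToks, tv.1 <+: tw.1 → tv = tw := by decide

lemma pvToks_val_range : ∀ tv ∈ pvToks, 1 ≤ tv.2 ∧ tv.2 ≤ 9 := by decide

-- membership in one while-loop's collected list
lemma pvCollect_mem (line sub : List Char) (hs : sub ≠ []) (v : Int) :
    ∀ (fuel start : Nat) (acc : List (Int × Int)), start ≤ line.length →
      line.length + 1 ≤ fuel + start →
      ∀ p : Int × Int,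
        (p ∈ pvCollect line sub v fuel start acc ↔
          p ∈ acc ∨ ∃ j : Nat, start ≤ j ∧ sub <+: line.drop j ∧ p = (v, (j : Int))) := by
  intro fuel
  induction fuel with
  | zero =>
    intro start acc h1 h2 p
    exact absurd h2 (by omega)
  | succ fuel ih =>
    intro start acc h1 h2 p
    by_cases h : PySem.Chars.findFrom line sub (start : Int) none = -1
    · simp only [pvCollect, h, if_pos]
      have hno : ¬ sub <:+: line.drop start :=
        (PySem.Chars.findFrom_natCast_eq_neg_one_iff line sub start h1).mp h
      constructor
      · exact Or.inl
      · rintro (hp | ⟨j, hj, hpre, rfl⟩)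
        · exact hp
        · exfalso
          have hdrop : line.drop j = (line.drop start).drop (j - start) := by
            rw [List.drop_drop]; congr 1; omega
          have hex : ∃ k, sub <+: (line.drop start).drop k := ⟨j - start, hdrop ▸ hpre⟩
          have hisin := (PySem.Chars.exists_prefix_drop_iff_isIn sub (line.drop start)).mp hex
          have hfalse := (PySem.Chars.isIn_eq_false_iff sub (line.drop start)).mpr hno
          rw [hisin] at hfalse
          simp at hfalse
    · obtain ⟨hle, hpre, hmin⟩ := PySem.Chars.findFrom_natCast_spec line sub start h1 h
      set idx := PySem.Chars.findFrom line sub (start : Int) none with hidxdef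
      have h0 : (0 : Int) ≤ idx := le_trans (Int.natCast_nonneg start) hle
      have hidxeq : idx = ((idx.toNat : Nat) : Int) := (Int.toNat_of_nonneg h0).symm
      have hidxlt : idx.toNat < line.length := by
        by_contra hc
        have hnil : line.drop idx.toNat = [] := List.drop_eq_nil_of_le (by omega)
        rw [hnil] at hpre
        exact hs (List.prefix_nil.mp hpre)
      have hstartle : start ≤ idx.toNat := by omega
      simp only [pvCollect]
      rw [← hidxdef, if_neg h]
      rw [ih (idx.toNat + 1) (acc ++ [(v, idx)]) (by omega) (by omega) p]
      simp only [List.mem_append, List.mem_singleton]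
      constructor
      · rintro ((hp | hp) | ⟨j, hj, hjp, rfl⟩)
        · exact Or.inl hp
        · exact Or.inr ⟨idx.toNat, hstartle, hpre, by rw [hp]; exact congrArg (Prod.mk v) hidxeq⟩
        · exact Or.inr ⟨j, by omega, hjp, rfl⟩
      · rintro (hp | ⟨j, hj, hjp, rfl⟩)
        · exact Or.inl (Or.inl hp)
        · rcases lt_trichotomy j idx.toNat with hlt | heq | hgt
          · exact absurd hjp (hmin j hj hlt)
          · subst heq
            exact Or.inl (Or.inr (congrArg (Prod.mk v) hidxeq.symm))
          · exact Or.inr ⟨j, by omega, hjp, rfl⟩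

lemma pvFoldl_mem (cs : List Char) (toks : List (List Char × Int))
    (hne : ∀ tv ∈ toks, tv.1 ≠ ([] : List Char)) (acc : List (Int × Int)) (p : Int × Int) :
    p ∈ toks.foldl (fun acc tv => pvCollect cs tv.1 tv.2 (cs.length + 1) 0 acc) acc ↔
      p ∈ acc ∨ ∃ tv ∈ toks, ∃ j : Nat, tv.1 <+: cs.drop j ∧ p = (tv.2, (j : Int)) := by
  induction toks generalizing acc with
  | nil => simp
  | cons t ts ih =>
    simp only [List.foldl_cons]
    rw [ih (fun tv h => hne tv (List.mem_cons_of_mem t h))]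
    rw [pvCollect_mem cs t.1 (hne t List.mem_cons_self) t.2 (cs.length + 1) 0 acc
      (by omega) (by omega) p]
    simp only [Nat.zero_le, true_and, List.mem_cons]
    constructor
    · rintro ((hp | ⟨j, hj, rfl⟩) | ⟨tv, htv, j, hj, rfl⟩)
      · exact Or.inl hp
      · exact Or.inr ⟨t, Or.inl rfl, j, hj, rfl⟩
      · exact Or.inr ⟨tv, Or.inr htv, j, hj, rfl⟩
    · rintro (hp | ⟨tv, htv | htv, j, hj, rfl⟩)
      · exact Or.inl (Or.inl hp)
      · subst htv; exact Or.inl (Or.inr ⟨j, hj, rfl⟩)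
      · exact Or.inr ⟨tv, htv, j, hj, rfl⟩

-- membership in num_extract
lemma pvExtract_mem (cs : List Char) (p : Int × Int) :
    p ∈ pvExtract cs ↔ ∃ tv ∈ pvToks, ∃ j : Nat, tv.1 <+: cs.drop j ∧ p = (tv.2, (j : Int)) := by
  have hfold : pvExtract cs =
      (pvNumStrList ++ pvNumList.map (fun n => (PySem.Int.toChars n, n))).foldl
        (fun acc tv => pvCollect cs tv.1 tv.2 (cs.length + 1) 0 acc) [] := by
    rw [List.foldl_append, List.foldl_map]; rfl
  rw [hfold, pvToks_eq, pvFoldl_mem cs pvToks pvToks_ne_nil [] p]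
  simp

lemma pvDigitHead : ∀ tv ∈ pvToks, ('1' ≤ tv.1.headD ' ' ∧ tv.1.headD ' ' ≤ '9') →
    tv.1 = [tv.1.headD ' '] ∧ tv.2 = ((tv.1.headD ' ').toNat : Int) - 48 := by decide

lemma pvWordOrDigit : ∀ tv ∈ pvToks,
    ('1' ≤ tv.1.headD ' ' ∧ tv.1.headD ' ' ≤ '9') ∨ tv ∈ pvWordsB := by decide

lemma pvWordsB_sub : ∀ wv ∈ pvWordsB, wv ∈ pvToks := by decide

lemma pvDigitTok_mem (c : Char) (h1 : '1' ≤ c) (h2 : c ≤ '9') :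
    (([c], (c.toNat : Int) - 48)) ∈ pvToks := by
  have hx1 := UInt32.le_iff_toNat_le.mp ((Char.le_def).mp h1)
  have hx2 := UInt32.le_iff_toNat_le.mp ((Char.le_def).mp h2)
  have hl1 : ('1' : Char).val.toNat = 49 := by decide
  have hl9 : ('9' : Char).val.toNat = 57 := by decide
  have hb1 : 49 ≤ c.toNat := by unfold Char.toNat; omega
  have hb2 : c.toNat ≤ 57 := by unfold Char.toNat; omega
  set k := c.toNat with hk
  have hchar : ∀ d : Char, c.toNat = d.toNat → c = d := by
    intro d hcd
    apply Char.ext; apply UInt32.toNat_inj.mp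
    unfold Char.toNat at hcd; exact hcd
  interval_cases k
  · rw [hchar '1' (by rw [← hk]; decide)] ; decide
  · rw [hchar '2' (by rw [← hk]; decide)] ; decide
  · rw [hchar '3' (by rw [← hk]; decide)] ; decide
  · rw [hchar '4' (by rw [← hk]; decide)] ; decide
  · rw [hchar '5' (by rw [← hk]; decide)] ; decide
  · rw [hchar '6' (by rw [← hk]; decide)] ; decide
  · rw [hchar '7' (by rw [← hk]; decide)] ; decide
  · rw [hchar '8' (by rw [← hk]; decide)] ; decide
  · rw [hchar '9' (by rw [← hk]; decide)] ; decide

-- B's head-match equals "some token matches here"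
lemma pvMatchHead_iff (s : List Char) (v : Int) :
    pvMatchHead s = some v ↔ ∃ tv ∈ pvToks, tv.1 <+: s ∧ v = tv.2 := by
  match s with
  | [] =>
    simp only [pvMatchHead]
    constructor
    · intro h; cases h
    · rintro ⟨tv, htv, hpre, rfl⟩
      exact absurd (List.prefix_nil.mp hpre) (pvToks_ne_nil tv htv)
  | c :: rest =>
    by_cases hd : '1' ≤ c ∧ c ≤ '9'
    · simp only [pvMatchHead, if_pos hd, Option.some.injEq]
      constructor
      · rintro rfl
        exact ⟨([c], (c.toNat : Int) - 48), pvDigitTok_mem c hd.1 hd.2,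
          ⟨rest, rfl⟩, rfl⟩
      · rintro ⟨tv, htv, hpre, rfl⟩
        obtain ⟨t1, ht1⟩ : ∃ t1, tv.1 = c :: t1 := by
          rcases htv1 : tv.1 with _ | ⟨hc, tl⟩
          · exact absurd htv1 (pvToks_ne_nil tv htv)
          · rw [htv1] at hpre
            obtain ⟨r, hr⟩ := hpre
            injection hr with h1 h2
            exact ⟨tl, by rw [h1]⟩
        have hhead : tv.1.headD ' ' = c := by rw [ht1]; rfl
        have := pvDigitHead tv htv (by rw [hhead]; exact hd)
        rw [hhead] at this
        exact this.2.symm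
    · simp only [pvMatchHead, if_neg hd]
      constructor
      · intro hmap
        obtain ⟨wv, hfind, hv⟩ := Option.map_eq_some_iff.mp hmap
        have hwmem := List.mem_of_find?_eq_some hfind
        have hwpred : PySem.Chars.startswith (c :: rest) wv.1 = true :=
          List.find?_some (p := fun wv : List Char × Int => PySem.Chars.startswith (c :: rest) wv.1) hfind
        exact ⟨wv, pvWordsB_sub wv hwmem,
          (PySem.Chars.startswith_iff (c :: rest) wv.1).mp hwpred, hv.symm⟩
      · rintro ⟨tv, htv, hpre, rfl⟩
        obtain ⟨t1, ht1⟩ : ∃ t1, tv.1 = c :: t1 := by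
          rcases htv1 : tv.1 with _ | ⟨hc, tl⟩
          · exact absurd htv1 (pvToks_ne_nil tv htv)
          · rw [htv1] at hpre
            obtain ⟨r, hr⟩ := hpre
            injection hr with h1 h2
            exact ⟨tl, by rw [h1]⟩
        have hhead : tv.1.headD ' ' = c := by rw [ht1]; rfl
        have hword : tv ∈ pvWordsB := by
          rcases pvWordOrDigit tv htv with hdig | hw
          · rw [hhead] at hdig; exact absurd hdig hd
          · exact hw
        rcases hfind : pvWordsB.find? (fun wv => PySem.Chars.startswith (c :: rest) wv.1) with _ | wv
        · exfalso
          have := List.find?_eq_none.mp hfind tv hword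
          exact this ((PySem.Chars.startswith_iff (c :: rest) tv.1).mpr hpre)
        · have hwmem := List.mem_of_find?_eq_some hfind
          have hwpredb : PySem.Chars.startswith (c :: rest) wv.1 = true :=
            List.find?_some (p := fun wv : List Char × Int => PySem.Chars.startswith (c :: rest) wv.1) hfind
          have hwpre := (PySem.Chars.startswith_iff (c :: rest) wv.1).mp hwpredb
          have heq : tv = wv := by
            rcases List.prefix_or_prefix_of_prefix hpre hwpre with hh | hh
            · exact pvToks_prefix_free tv htv wv (pvWordsB_sub wv hwmem) hh
            · exact (pvToks_prefix_free wv (pvWordsB_sub wv hwmem) tv htv hh).symm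
          rw [heq, hfind]; rfl

-- first/last matched value over the suffixes of s
def pvFirstV : List Char → Option Int
  | [] => none
  | c :: rest =>
    match pvMatchHead (c :: rest) with
    | some v => some v
    | none => pvFirstV rest

def pvLastV : List Char → Option Int
  | [] => none
  | c :: rest =>
    match pvLastV rest with
    | some v => some v
    | none => pvMatchHead (c :: rest)

lemma pvScan_eq (s : List Char) :
    ∀ f l : Option Int,
      pvScan s (f, l) =
        ((match f with | some x => some x | none => pvFirstV s),
         (match pvLastV s with | some x => some x | none => l)) := by
  induction s with
  | nil =>
    intro f l
    cases f <;> cases l <;> rfl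
  | cons c rest ih =>
    intro f l
    rcases hm : pvMatchHead (c :: rest) with _ | v
    · have hf : pvFirstV (c :: rest) = pvFirstV rest := by simp [pvFirstV, hm]
      have hl : pvLastV (c :: rest) = pvLastV rest := by
        simp only [pvLastV]
        rcases pvLastV rest <;> simp [hm]
      simp only [pvScan, hm]
      rw [ih, hf, hl]
    · have hf : pvFirstV (c :: rest) = (match pvMatchHead (c :: rest) with
        | some w => some w | none => pvFirstV rest) := rfl
      have hl : pvLastV (c :: rest) = (match pvLastV rest with
        | some w => some w | none => pvMatchHead (c :: rest)) := rfl
      simp only [pvScan, hm]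
      rw [ih]
      rcases f with _ | x <;> rcases hr : pvLastV rest with _ | w <;>
        simp [hf, hl, hr, hm]

lemma pvFirstV_of (s : List Char) :
    ∀ (j : Nat) (v : Int), pvMatchHead (s.drop j) = some v →
      (∀ j' < j, pvMatchHead (s.drop j') = none) → pvFirstV s = some v := by
  induction s with
  | nil =>
    intro j v hm _
    simp [pvMatchHead] at hm
  | cons c rest ih =>
    intro j v hm hmin
    cases j with
    | zero =>
      simp only [List.drop_zero] at hm
      simp [pvFirstV, hm]
    | succ k =>
      have h0 := hmin 0 (Nat.succ_pos k)
      simp only [List.drop_zero] at h0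
      simp only [pvFirstV, h0]
      exact ih k v (by simpa using hm) (fun j' hj' => by simpa using hmin (j' + 1) (by omega))

lemma pvLastV_none (s : List Char) :
    (∀ j : Nat, pvMatchHead (s.drop j) = none) → pvLastV s = none := by
  induction s with
  | nil => intro _; rfl
  | cons c rest ih =>
    intro h
    have h0 := h 0
    simp only [List.drop_zero] at h0
    have ht : pvLastV rest = none := ih (fun j => by simpa using h (j + 1))
    simp [pvLastV, ht, h0]

lemma pvLastV_of (s : List Char) :
    ∀ (j : Nat) (v : Int), pvMatchHead (s.drop j) = some v →
      (∀ j' : Nat, j < j' → pvMatchHead (s.drop j') = none) → pvLastV s = some v := by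
  induction s with
  | nil =>
    intro j v hm _
    simp [pvMatchHead] at hm
  | cons c rest ih =>
    intro j v hm hmax
    cases j with
    | zero =>
      simp only [List.drop_zero] at hm
      have ht : pvLastV rest = none :=
        pvLastV_none rest (fun j => by simpa using hmax (j + 1) (by omega))
      simp [pvLastV, ht, hm]
    | succ k =>
      have ht : pvLastV rest = some v :=
        ih k v (by simpa using hm) (fun j' hj' => by simpa using hmax (j' + 1) (by omega))
      simp [pvLastV, ht]

lemma pvConcat_eq (l h : Int) (h1 : 1 ≤ l) (h2 : l ≤ 9) (h3 : 1 ≤ h) (h4 : h ≤ 9) :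
    (PySem.Int.ofChars? (PySem.Int.toChars l ++ PySem.Int.toChars h)).getD 0 = 10 * l + h := by
  interval_cases l <;> interval_cases h <;> decide

lemma pvAllSubs_tok : ∀ t ∈ pvAllSubs, ∃ tv ∈ pvToks, tv.1 = t := by decide

lemma pvLine_eq (cs : List Char) (hpre : ∃ t ∈ pvAllSubs, PySem.Chars.isIn t cs = true) :
    pvLineA cs = pvLineB cs := by
  obtain ⟨t, ht, hin⟩ := hpre
  obtain ⟨j0, hj0⟩ := (PySem.Chars.exists_prefix_drop_iff_isIn t cs).mpr hin
  obtain ⟨tv0, htv0, htv0e⟩ := pvAllSubs_tok t ht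
  have hmem0 : ((tv0.2, (j0 : Int)) : Int × Int) ∈ pvExtract cs :=
    (pvExtract_mem cs _).mpr ⟨tv0, htv0, j0, by rw [htv0e]; exact hj0, rfl⟩
  have hne : pvExtract cs ≠ [] := List.ne_nil_of_mem hmem0
  rcases hlo : PySem.List.min? (pvExtract cs) (fun x => x.2) with _ | lo
  · exact absurd ((PySem.List.min?_eq_none_iff _ _).mp hlo) hne
  rcases hhi : PySem.List.max? (pvExtract cs) (fun x => x.2) with _ | hi
  · exact absurd ((PySem.List.max?_eq_none_iff _ _).mp hhi) hne
  obtain ⟨tva, htva, ja, hja, hloe⟩ := (pvExtract_mem cs lo).mp (PySem.List.min?_mem hlo)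
  obtain ⟨tvb, htvb, jb, hjb, hhie⟩ := (pvExtract_mem cs hi).mp (PySem.List.max?_mem hhi)
  have hlo1 : lo.1 = tva.2 := by rw [hloe]
  have hlo2 : lo.2 = (ja : Int) := by rw [hloe]
  have hhi1 : hi.1 = tvb.2 := by rw [hhie]
  have hhi2 : hi.2 = (jb : Int) := by rw [hhie]
  have hfm : pvMatchHead (cs.drop ja) = some lo.1 :=
    (pvMatchHead_iff _ _).mpr ⟨tva, htva, hja, hlo1⟩
  have hlm : pvMatchHead (cs.drop jb) = some hi.1 :=
    (pvMatchHead_iff _ _).mpr ⟨tvb, htvb, hjb, hhi1⟩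
  have hfirst : pvFirstV cs = some lo.1 := by
    apply pvFirstV_of cs ja lo.1 hfm
    intro j' hj'
    rcases hmh : pvMatchHead (cs.drop j') with _ | v'
    · rfl
    · exfalso
      obtain ⟨tv', htv', hp', hv'⟩ := (pvMatchHead_iff _ _).mp hmh
      have hmem' : ((tv'.2, (j' : Int)) : Int × Int) ∈ pvExtract cs :=
        (pvExtract_mem cs _).mpr ⟨tv', htv', j', hp', rfl⟩
      have hle := PySem.List.min?_isMin hlo _ hmem'
      rw [hlo2] at hle
      simp only at hle
      omega
  have hlast : pvLastV cs = some hi.1 := by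
    apply pvLastV_of cs jb hi.1 hlm
    intro j' hj'
    rcases hmh : pvMatchHead (cs.drop j') with _ | v'
    · rfl
    · exfalso
      obtain ⟨tv', htv', hp', hv'⟩ := (pvMatchHead_iff _ _).mp hmh
      have hmem' : ((tv'.2, (j' : Int)) : Int × Int) ∈ pvExtract cs :=
        (pvExtract_mem cs _).mpr ⟨tv', htv', j', hp', rfl⟩
      have hle := PySem.List.max?_isMax hhi _ hmem'
      rw [hhi2] at hle
      simp only at hle
      omega
  have hrange_a := pvToks_val_range tva htva
  have hrange_b := pvToks_val_range tvb htvb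
  have hB : pvLineB cs = 10 * lo.1 + hi.1 := by
    unfold pvLineB
    rw [pvScan_eq cs none none]
    simp [hfirst, hlast]
  have hA : pvLineA cs = 10 * lo.1 + hi.1 := by
    unfold pvLineA
    rw [hlo, hhi]
    exact pvConcat_eq lo.1 hi.1 (by rw [hlo1]; exact hrange_a.1) (by rw [hlo1]; exact hrange_a.2)
      (by rw [hhi1]; exact hrange_b.1) (by rw [hhi1]; exact hrange_b.2)
  rw [hA, hB]

lemma pvSum_eq : ∀ (lines : List String),
    (∀ s ∈ lines, ∃ t ∈ pvAllSubs, PySem.Chars.isIn t s.toList = true) →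
    ∀ acc : Int,
      acc + (lines.map (fun line => pvLineA line.toList)).sum =
        lines.foldl (fun acc line => acc + pvLineB line.toList) acc := by
  intro lines
  induction lines with
  | nil => intro _ acc; simp
  | cons s ss ih =>
    intro h acc
    simp only [List.map_cons, List.sum_cons, List.foldl_cons]
    rw [← ih (fun x hx => h x (List.mem_cons_of_mem s hx)) (acc + pvLineB s.toList)]
    rw [pvLine_eq s.toList (h s List.mem_cons_self)]
    ring

-- ===== VERDICT (by name: the statement is the Claim_ definition above) =====
theorem sum_calibration_strings_spec : Claim_equal_sum_calibration_strings := by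
  intro content _ hpre
  unfold Spec_sum_calibration_strings sum_calibration_strings sum_calibration_strings_alt
  simpa using pvSum_eq content hpre 0
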